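-- pv_equiv track=rewrite | github.com/wzzzd/lm_ner_span | model/metrics/ner_metrics.py | bert_extract_item
-- ===== SOURCE A (Python) =====
-- def bert_extract_item(line_start, line_end):
--     S = []
--     for i, s_l in enumerate(line_start):
--         if s_l == 0:
--             continue
--         for j, e_l in enumerate(line_end[i:]):
--             if s_l == e_l:
--                 S.append((s_l, i, i + j))
--                 break
--     return S
-- ===== SOURCE B (Python) =====
-- def bert_extract_item(line_start, line_end):
--     # One backward sweep: walking i downward, last[label] is always the
--     # smallest end position j >= i carrying that label.
--     last = {}
--     out = []
--     n, m = len(line_start), len(line_end)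
--     for i in range(max(n, m) - 1, -1, -1):
--         if i < m:
--             last[line_end[i]] = i
--         if i < n:
--             s = line_start[i]
--             if s != 0 and s in last:
--                 out.append((s, i, last[s]))
--     out.reverse()
--     return out
-- ===== Notes on version B (the rewrite author's own statement) =====
-- stated objective: faster
-- what changed: B replaces A's per-start rescan of the line_end suffix by a single backward sweep that maintains a dict 'first end position >= i for each label', emitting matches in descending i and reversing at the end.
import Mathlib
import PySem

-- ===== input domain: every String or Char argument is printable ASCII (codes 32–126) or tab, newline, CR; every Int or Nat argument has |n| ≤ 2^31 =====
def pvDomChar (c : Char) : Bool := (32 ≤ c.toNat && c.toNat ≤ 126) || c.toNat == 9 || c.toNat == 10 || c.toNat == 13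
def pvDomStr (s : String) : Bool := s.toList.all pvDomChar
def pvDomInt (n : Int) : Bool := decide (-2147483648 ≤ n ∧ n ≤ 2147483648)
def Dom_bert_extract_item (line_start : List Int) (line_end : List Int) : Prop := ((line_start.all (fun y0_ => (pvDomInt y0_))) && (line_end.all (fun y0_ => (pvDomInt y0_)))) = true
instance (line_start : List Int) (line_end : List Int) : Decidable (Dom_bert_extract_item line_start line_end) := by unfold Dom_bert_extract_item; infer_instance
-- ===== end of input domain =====

-- B replaces A's per-start rescan of the line_end suffix by one backward sweep maintaining
-- "first end position >= i for each label" in a dict (objective: faster, O(n+m) vs O(n*m)).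

-- ===== PORT A =====
-- for i, s_l in enumerate(line_start): if s_l == 0: continue; for j, e_l in enumerate(line_end[i:]): if s_l == e_l: append (s_l,i,i+j); break
-- (the inner for/break is the first match: List.find?; i from enumerate is ≥ 0, so line_end[i:] is slice_from)
def bert_extract_item (line_start : List Int) (line_end : List Int) : List (List Int) :=
  (PySem.List.enumerate line_start 0).foldl (fun (S : List (List Int)) (p : Int × Int) =>
    if p.2 == 0 then S
    else
      match (PySem.List.enumerate (PySem.List.slice line_end (some p.1) none) 0).find?
              (fun q => p.2 == q.2) with
      | some q => S ++ [[p.2, p.1, p.1 + q.1]]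
      | none => S) []

-- ===== PORT B =====
-- the backward 'for i in range(max(n, m) - 1, -1, -1)' loop, as recursion on the counter:
-- at counter k+1 the current index is i = k; 'last[line_end[i]] = i' is Dict.insert,
-- 's in last' + 'last[s]' is one match on Dict.get?.
def bertAltGo (line_start line_end : List Int) : Nat → PySem.Dict Int Int → List (List Int) → List (List Int)
  | 0, _, out => out
  | Nat.succ k, last, out =>
    let last' := if h : k < line_end.length then PySem.Dict.insert last line_end[k] (k : Int) else last
    let out' :=
      if h : k < line_start.length then
        let s := line_start[k]
        if s ≠ 0 then
          match PySem.Dict.get? last' s with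
          | some j => out ++ [[s, (k : Int), j]]
          | none => out
        else out
      else out
    bertAltGo line_start line_end k last' out'

def bert_extract_item_alt (line_start : List Int) (line_end : List Int) : List (List Int) :=
  (bertAltGo line_start line_end (max line_start.length line_end.length) PySem.Dict.empty []).reverse

-- ===== PRECONDITION & SPEC =====
def Spec_bert_extract_item (line_start : List Int) (line_end : List Int) (out : List (List Int)) : Prop := out = bert_extract_item_alt line_start line_end
instance (line_start : List Int) (line_end : List Int) (out : List (List Int)) : Decidable (Spec_bert_extract_item line_start line_end out) := by unfold Spec_bert_extract_item; infer_instance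

-- ===== CLAIM (what is proved, stated in full; the proofs are below) =====
def Claim_equal_bert_extract_item : Prop := ∀ (line_start : List Int) (line_end : List Int), Dom_bert_extract_item line_start line_end → Spec_bert_extract_item line_start line_end (bert_extract_item line_start line_end)

-- ===== LEMMAS AND PROOFS =====

-- reference: first index (counting from t) in l whose value is s
def pvFirstMatch (l : List Int) (s : Int) (t : Int) : Option Int :=
  match l with
  | [] => none
  | e :: r => if s = e then some t else pvFirstMatch r s (t + 1)

-- the per-index contribution both programs produce at index i
def pvItem (line_start line_end : List Int) (i : Nat) : List (List Int) :=
  if h : i < line_start.length then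
    if line_start[i] = 0 then []
    else
      match pvFirstMatch (line_end.drop i) line_start[i] (i : Int) with
      | some j => [[line_start[i], (i : Int), j]]
      | none => []
  else []

-- pyRange 0 n with unit step is List.range, cast to Int
lemma pvRangeNat (n : Nat) :
    PySem.List.pyRange 0 (n : Int) = (List.range n).map Int.ofNat := by
  induction n with
  | zero => simp [PySem.List.pyRange]
  | succ n ih =>
    rw [List.range_succ, List.map_append,
        show ((n + 1 : Nat) : Int) = (n : Int) + 1 by push_cast; ring,
        PySem.List.pyRange_one_append 0 (n : Int) ((n : Int) + 1) (by omega) (by omega), ih,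
        PySem.List.pyRange_one_cons (by omega : (n : Int) < (n : Int) + 1)]
    simp [PySem.List.pyRange]

-- A's inner loop computes pvFirstMatch
lemma pvA_inner (l : List Int) (s : Int) :
    ∀ (t i : Int),
      Option.map (fun q : Int × Int => i + q.1)
        ((PySem.List.enumerate l t).find? (fun q => s == q.2)) = pvFirstMatch l s (i + t) := by
  induction l with
  | nil => intro t i; simp [PySem.List.enumerate_nil, pvFirstMatch]
  | cons e r ih =>
    intro t i
    rw [PySem.List.enumerate_cons]
    by_cases h : s = e
    · rw [List.find?_cons_of_pos (by simpa using h)]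
      simp [pvFirstMatch, h]
    · rw [List.find?_cons_of_neg (by simpa using h)]
      simp only [pvFirstMatch, if_neg h]
      rw [show i + t + 1 = i + (t + 1) by ring]
      exact ih (t + 1) i

-- A = concatenation of the per-index contributions
lemma pvA_eq (line_start line_end : List Int) :
    bert_extract_item line_start line_end
      = (List.range line_start.length).flatMap (pvItem line_start line_end) := by
  unfold bert_extract_item
  have hbody : (fun (S : List (List Int)) (p : Int × Int) =>
      if p.2 == 0 then S
      else
        match (PySem.List.enumerate (PySem.List.slice line_end (some p.1) none) 0).find?
                (fun q => p.2 == q.2) with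
        | some q => S ++ [[p.2, p.1, p.1 + q.1]]
        | none => S)
      = (fun (S : List (List Int)) (p : Int × Int) => S ++
          (if p.2 == 0 then []
           else
             match (PySem.List.enumerate (PySem.List.slice line_end (some p.1) none) 0).find?
                     (fun q => p.2 == q.2) with
             | some q => [[p.2, p.1, p.1 + q.1]]
             | none => [])) := by
    funext S p
    by_cases h0 : p.2 == 0
    · simp [h0]
    · simp only [h0]
      cases (PySem.List.enumerate (PySem.List.slice line_end (some p.1) none) 0).find?
              (fun q => p.2 == q.2) with
      | none => simp
      | some q => simp
  rw [hbody, PySem.List.foldl_append_eq_flatMap, List.nil_append]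
  -- rewrite the flatMap over enumerate into a flatMap over range
  have henum : PySem.List.enumerate line_start 0
      = (List.range line_start.length).map
          (fun k : Nat => ((k : Int), line_start.getD k 0)) := by
    rw [PySem.List.enumerate_eq_map_pyRange line_start 0,
        show PySem.List.len line_start = (line_start.length : Int) from rfl,
        pvRangeNat, List.map_map]
    apply List.map_congr_left
    intro k _
    simp [PySem.List.pyGetD_natCast]
  rw [henum, List.flatMap_map]
  refine List.flatMap_congr ?_
  intro k hk
  rw [List.mem_range] at hk
  simp only [pvItem, dif_pos hk, List.getD_eq_getElem _ _ hk]
  by_cases h0 : line_start[k] = 0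
  · simp [h0]
  · simp only [beq_iff_eq, h0, if_false]
    rw [PySem.List.slice_from line_end (by omega : (0:Int) ≤ (k : Int)),
        show ((k : Int)).toNat = k by omega]
    have hA := pvA_inner (line_end.drop k) line_start[k] 0 (k : Int)
    rw [add_zero] at hA
    rw [← hA]
    cases (PySem.List.enumerate (line_end.drop k) 0).find? (fun q => line_start[k] == q.2) with
    | none => simp
    | some q => simp

-- stepping the first-match reference one index down
lemma pvFirstMatch_step (line_end : List Int) (k : Nat) (s : Int) :
    pvFirstMatch (line_end.drop k) s (k : Int)
      = if h : k < line_end.length then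
          (if s = line_end[k] then some (k : Int)
           else pvFirstMatch (line_end.drop (k + 1)) s ((k : Int) + 1))
        else none := by
  by_cases h : k < line_end.length
  · rw [dif_pos h, List.drop_eq_getElem_cons h]
    simp [pvFirstMatch]
  · rw [dif_neg h, List.drop_eq_nil_of_le (by omega)]
    rfl

-- the sweep invariant: if 'last' holds the first end ≥ k for every label, the loop from
-- counter k appends exactly the reversed contributions of indices < k
lemma pvB_go (line_start line_end : List Int) :
    ∀ (k : Nat) (last : PySem.Dict Int Int) (out : List (List Int)),
      (∀ s, PySem.Dict.get? last s = pvFirstMatch (line_end.drop k) s (k : Int)) →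
      bertAltGo line_start line_end k last out
        = out ++ ((List.range k).flatMap (pvItem line_start line_end)).reverse := by
  intro k
  induction k with
  | zero => intro last out _; simp [bertAltGo]
  | succ k ih =>
    intro last out hinv
    have hinv' : ∀ s,
        PySem.Dict.get?
          (if h : k < line_end.length then PySem.Dict.insert last line_end[k] (k : Int) else last) s
          = pvFirstMatch (line_end.drop k) s (k : Int) := by
      intro s
      by_cases h : k < line_end.length
      · rw [dif_pos h, PySem.Dict.get?_insert, pvFirstMatch_step, dif_pos h]
        by_cases hs : s = line_end[k]
        · rw [if_pos hs, if_pos hs]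
        · rw [if_neg hs, if_neg hs, hinv s]
          norm_cast
      · rw [dif_neg h, hinv s,
            List.drop_eq_nil_of_le (by omega : line_end.length ≤ k + 1),
            List.drop_eq_nil_of_le (by omega : line_end.length ≤ k)]
        rfl
    rw [bertAltGo, ih _ _ hinv', List.range_succ, List.flatMap_append, List.reverse_append,
        List.flatMap_cons, List.flatMap_nil, List.append_nil, ← List.append_assoc]
    congr 1
    by_cases hk : k < line_start.length
    · rw [dif_pos hk]
      simp only [pvItem, dif_pos hk]
      by_cases h0 : line_start[k] = 0
      · simp [h0]
      · simp only [ne_eq, h0, not_false_iff, if_true]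
        rw [hinv' line_start[k]]
        cases pvFirstMatch (line_end.drop k) line_start[k] (k : Int) with
        | none => simp
        | some j => simp
    · rw [dif_neg hk]
      simp [pvItem, hk]

-- contributions vanish at indices ≥ line_start.length
lemma pvItem_big (line_start line_end : List Int) (k : Nat) (hk : line_start.length ≤ k) :
    pvItem line_start line_end k = [] := by
  unfold pvItem
  rw [dif_neg (by omega)]

lemma pvB_eq (line_start line_end : List Int) :
    bert_extract_item_alt line_start line_end
      = (List.range line_start.length).flatMap (pvItem line_start line_end) := by
  unfold bert_extract_item_alt
  rw [pvB_go line_start line_end _ PySem.Dict.empty []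
      (by
        intro s
        rw [List.drop_eq_nil_of_le (by omega : line_end.length ≤ max line_start.length line_end.length)]
        rfl)]
  rw [List.nil_append, List.reverse_reverse]
  obtain ⟨d, hd⟩ : ∃ d, max line_start.length line_end.length = line_start.length + d :=
    ⟨max line_start.length line_end.length - line_start.length, by omega⟩
  rw [hd, List.range_add, List.flatMap_append]
  have : (List.map (fun x => line_start.length + x) (List.range d)).flatMap
      (pvItem line_start line_end) = [] := by
    rw [List.flatMap_map]
    apply List.flatMap_eq_nil_iff.mpr
    intro k _
    exact pvItem_big _ _ _ (by omega)
  rw [this, List.append_nil]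

-- ===== VERDICT (by name: the statement is the Claim_ definition above) =====
theorem bert_extract_item_spec : Claim_equal_bert_extract_item := by
  intro line_start line_end _
  unfold Spec_bert_extract_item
  rw [pvA_eq, pvB_eq]
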